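-- pv_equiv track=rewrite | github.com/k-yonezu/horse_racing | utils/return_calculation.py | umaren
-- ===== SOURCE A (Python) =====
-- PRICE_OF_BETTING_TICKET = 100
--
-- def umaren(tickets, target_ranks, prizes):
--     num_hit = 0
--     ret = 0
--     for ticket in tickets:
--         rank = target_ranks[ticket]
--         if rank[0] in [1, 2] and rank[1] in [1, 2]:
--             num_hit += 1
--             ret += prizes[ticket][0] - PRICE_OF_BETTING_TICKET
--         else:
--             ret -= PRICE_OF_BETTING_TICKET
--     return num_hit, ret
-- ===== SOURCE B (Python) =====
-- PRICE_OF_BETTING_TICKET = 100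
--
--
-- def umaren(tickets, target_ranks, prizes):
--     # Stage 1: precompute, per key of target_ranks, its net payout
--     # (None for a miss), so the ticket loop is a pure table lookup.
--     net = {}
--     for key, rank in target_ranks.items():
--         hit = len(rank) >= 2 and rank[0] in (1, 2) and rank[1] in (1, 2)
--         prize = prizes.get(key, [])
--         net[key] = prize[0] - PRICE_OF_BETTING_TICKET if hit and prize else None
--     # Stage 2: fold the tickets through the table.
--     num_hit = 0
--     ret = 0
--     for ticket in tickets:
--         v = net[ticket]
--         if v is None:
--             ret -= PRICE_OF_BETTING_TICKET
--         else:
--             num_hit += 1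
--             ret += v
--     return num_hit, ret
-- ===== Notes on version B (the rewrite author's own statement) =====
-- stated objective: alternative
-- what changed: B first builds a payout table keyed by target_ranks entries (net winnings for a hit, None for a miss), traversing the dicts instead of the tickets, and then folds the tickets through that table; A decides hit/miss and looks up the prize inside the ticket loop itself.
import Mathlib
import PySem

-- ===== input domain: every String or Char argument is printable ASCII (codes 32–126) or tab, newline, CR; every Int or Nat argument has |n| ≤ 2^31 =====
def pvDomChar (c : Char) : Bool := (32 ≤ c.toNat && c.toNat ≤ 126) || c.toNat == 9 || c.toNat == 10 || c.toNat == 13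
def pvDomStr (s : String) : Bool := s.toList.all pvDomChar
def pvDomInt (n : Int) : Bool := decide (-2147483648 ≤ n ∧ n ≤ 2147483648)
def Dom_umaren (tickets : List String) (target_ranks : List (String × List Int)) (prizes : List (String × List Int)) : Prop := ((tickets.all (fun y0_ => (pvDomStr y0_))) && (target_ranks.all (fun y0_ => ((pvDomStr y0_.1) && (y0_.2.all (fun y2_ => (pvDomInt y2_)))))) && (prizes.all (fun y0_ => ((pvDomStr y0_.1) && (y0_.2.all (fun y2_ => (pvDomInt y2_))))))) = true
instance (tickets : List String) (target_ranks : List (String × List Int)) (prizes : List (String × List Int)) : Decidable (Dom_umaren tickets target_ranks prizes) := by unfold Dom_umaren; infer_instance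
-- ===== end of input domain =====

-- B precomputes a payout table over target_ranks' entries (net winnings for a hit, none for a
-- miss) and then folds the tickets through that table: an alternative, staged decomposition.

-- ===== PORT A =====
def umaren (tickets : List String) (target_ranks : List (String × List Int)) (prizes : List (String × List Int)) : Int × Int :=
  tickets.foldl
    (fun (s : Int × Int) ticket =>
      let rank := (List.lookup ticket target_ranks).getD []
      if ((PySem.List.pyGet? rank 0).getD 0 = 1 ∨ (PySem.List.pyGet? rank 0).getD 0 = 2) ∧
         ((PySem.List.pyGet? rank 1).getD 0 = 1 ∨ (PySem.List.pyGet? rank 1).getD 0 = 2) then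
        (s.1 + 1, s.2 + ((PySem.List.pyGet? ((List.lookup ticket prizes).getD []) 0).getD 0 - 100))
      else
        (s.1, s.2 - 100))
    (0, 0)

-- ===== PORT B =====
-- net value of one target_ranks entry: `prize[0] - 100 if hit and prize else None`
def pvNetVal (prizes : List (String × List Int)) (key : String) (rank : List Int) : Option Int :=
  let hit := 2 ≤ rank.length ∧
    ((PySem.List.pyGet? rank 0).getD 0 = 1 ∨ (PySem.List.pyGet? rank 0).getD 0 = 2) ∧
    ((PySem.List.pyGet? rank 1).getD 0 = 1 ∨ (PySem.List.pyGet? rank 1).getD 0 = 2)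
  let prize := (List.lookup key prizes).getD []
  if hit ∧ prize ≠ [] then some ((PySem.List.pyGet? prize 0).getD 0 - 100) else none

def umaren_alt (tickets : List String) (target_ranks : List (String × List Int)) (prizes : List (String × List Int)) : Int × Int :=
  let net := target_ranks.foldl (fun d p => d.insert p.1 (pvNetVal prizes p.1 p.2)) PySem.Dict.empty
  tickets.foldl
    (fun (s : Int × Int) ticket =>
      match (net.get? ticket).getD none with
      | none => (s.1, s.2 - 100)
      | some v => (s.1 + 1, s.2 + v))
    (0, 0)

-- ===== PRECONDITION & SPEC =====
-- pvPreTicket holds exactly when Python A handles the ticket without raising: the ticket is a key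
-- of target_ranks with a non-empty rank list, with a second rank entry whenever the first is 1 or
-- 2, and a key of prizes with a non-empty prize list whenever both ranks are in {1, 2}.
def pvPreTicket (target_ranks : List (String × List Int)) (prizes : List (String × List Int)) (t : String) : Bool :=
  (List.lookup t target_ranks).isSome &&
  (let rank := (List.lookup t target_ranks).getD []
   (PySem.List.pyGet? rank 0).isSome &&
   (if (PySem.List.pyGet? rank 0).getD 0 = 1 ∨ (PySem.List.pyGet? rank 0).getD 0 = 2 then
      (PySem.List.pyGet? rank 1).isSome &&
      (if (PySem.List.pyGet? rank 1).getD 0 = 1 ∨ (PySem.List.pyGet? rank 1).getD 0 = 2 then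
         (List.lookup t prizes).isSome &&
         (PySem.List.pyGet? ((List.lookup t prizes).getD []) 0).isSome
       else true)
    else true))

-- Pre_umaren = "A raises on no ticket" plus: target_ranks has no duplicate keys — an association
-- list with duplicate keys does not represent any Python dict (dict construction collapses them),
-- and only there could A's first-match lookup and B's insertion-built table disagree.
def Pre_umaren (tickets : List String) (target_ranks : List (String × List Int)) (prizes : List (String × List Int)) : Prop :=
  tickets.all (pvPreTicket target_ranks prizes) = true ∧ (target_ranks.map Prod.fst).Nodup
instance (tickets : List String) (target_ranks : List (String × List Int)) (prizes : List (String × List Int)) : Decidable (Pre_umaren tickets target_ranks prizes) := by unfold Pre_umaren; infer_instance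

def pvWitness_umaren : List String × (List (String × List Int)) × (List (String × List Int)) :=
  (["a", "b"], [("a", [1, 2]), ("b", [3, 1])], [("a", [500]), ("b", [900])])

def Spec_umaren (tickets : List String) (target_ranks : List (String × List Int)) (prizes : List (String × List Int)) (out : Int × Int) : Prop := out = umaren_alt tickets target_ranks prizes
instance (tickets : List String) (target_ranks : List (String × List Int)) (prizes : List (String × List Int)) (out : Int × Int) : Decidable (Spec_umaren tickets target_ranks prizes out) := by unfold Spec_umaren; infer_instance

-- ===== CLAIM (what is proved, stated in full; the proofs are below) =====
def Claim_equal_umaren : Prop := ∀ (tickets : List String) (target_ranks : List (String × List Int)) (prizes : List (String × List Int)), Dom_umaren tickets target_ranks prizes → Pre_umaren tickets target_ranks prizes → Spec_umaren tickets target_ranks prizes (umaren tickets target_ranks prizes)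

-- ===== LEMMAS AND PROOFS =====

-- lookup in a key-preserving map of an association list
lemma lookup_map_net (prizes : List (String × List Int)) (k : String) :
    ∀ trs : List (String × List Int),
      List.lookup k (trs.map (fun p => (p.1, pvNetVal prizes p.1 p.2)))
        = (List.lookup k trs).map (pvNetVal prizes k) := by
  intro trs
  induction trs with
  | nil => simp
  | cons p trs ih =>
    rcases p with ⟨k', r⟩
    simp only [List.map_cons, List.lookup_cons]
    by_cases h : k = k'
    · subst h; simp
    · simp only [beq_eq_false_iff_ne.mpr h, ih]

-- get? on a literal dict is first-match lookup
lemma get?_mk_lookup (k : String) :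
    ∀ L : List (String × Option Int),
      (PySem.Dict.mk L).get? k = ((List.lookup k L).map some).getD none := by
  intro L
  induction L with
  | nil => simp [PySem.Dict.get?]
  | cons p L ih =>
    rcases p with ⟨k', v⟩
    rw [PySem.Dict.get?_mk_cons]
    by_cases h : k = k'
    · subst h; simp
    · simp [List.lookup_cons, beq_eq_false_iff_ne.mpr h,
        beq_eq_false_iff_ne.mpr (Ne.symm h), ih]

-- the table built by B answers get? exactly like first-match lookup composed with pvNetVal
lemma net_get (target_ranks prizes : List (String × List Int))
    (hnd : (target_ranks.map Prod.fst).Nodup) (k : String) :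
    (target_ranks.foldl (fun d p => d.insert p.1 (pvNetVal prizes p.1 p.2)) PySem.Dict.empty).get? k
      = (List.lookup k target_ranks).map (pvNetVal prizes k) := by
  have hitems := PySem.Dict.items_foldl_insert_fresh (l := target_ranks)
    (k := Prod.fst) (v := fun p => pvNetVal prizes p.1 p.2) (d := PySem.Dict.empty)
    (by intro a _; simp [PySem.Dict.contains_empty]) hnd
  have hD : (target_ranks.foldl (fun d p => d.insert p.1 (pvNetVal prizes p.1 p.2)) PySem.Dict.empty)
      = PySem.Dict.mk (target_ranks.map (fun p => (p.1, pvNetVal prizes p.1 p.2))) := by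
    apply PySem.Dict.ext
    simpa using hitems
  rw [hD, get?_mk_lookup, lookup_map_net]
  cases List.lookup k target_ranks <;> simp

-- on a ticket A does not raise on, the two loop bodies agree for every accumulator
lemma step_eq (target_ranks prizes : List (String × List Int))
    (hnd : (target_ranks.map Prod.fst).Nodup) (t : String)
    (hpre : pvPreTicket target_ranks prizes t = true) (s : Int × Int) :
    (let rank := (List.lookup t target_ranks).getD []
     if ((PySem.List.pyGet? rank 0).getD 0 = 1 ∨ (PySem.List.pyGet? rank 0).getD 0 = 2) ∧
        ((PySem.List.pyGet? rank 1).getD 0 = 1 ∨ (PySem.List.pyGet? rank 1).getD 0 = 2) then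
       (s.1 + 1, s.2 + ((PySem.List.pyGet? ((List.lookup t prizes).getD []) 0).getD 0 - 100))
     else
       (s.1, s.2 - 100))
    = (match (((target_ranks.foldl (fun d p => d.insert p.1 (pvNetVal prizes p.1 p.2))
          PySem.Dict.empty).get? t).getD none : Option Int) with
       | none => (s.1, s.2 - 100)
       | some v => (s.1 + 1, s.2 + v)) := by
  rw [net_get target_ranks prizes hnd t]
  unfold pvPreTicket at hpre
  simp only [Bool.and_eq_true] at hpre
  obtain ⟨hlks, hpre⟩ := hpre
  obtain ⟨rank, hlk⟩ := Option.isSome_iff_exists.mp hlks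
  rw [hlk] at hpre ⊢
  simp only [Option.map_some, Option.getD_some] at hpre ⊢
  obtain ⟨h0s, hpre⟩ := hpre
  by_cases hr0 : (PySem.List.pyGet? rank 0).getD 0 = 1 ∨ (PySem.List.pyGet? rank 0).getD 0 = 2
  · rw [if_pos hr0] at hpre
    simp only [Bool.and_eq_true] at hpre
    obtain ⟨h1s, hpre⟩ := hpre
    obtain ⟨r1, h1⟩ := Option.isSome_iff_exists.mp h1s
    have hlen2 : 2 ≤ rank.length := by
      by_contra hl
      have : rank = [] ∨ ∃ a, rank = [a] := by
        cases rank with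
        | nil => exact Or.inl rfl
        | cons a tl => cases tl with
          | nil => exact Or.inr ⟨a, rfl⟩
          | cons b tl2 => exact absurd (by simp) hl
      rcases this with h | ⟨a, ha⟩
      · rw [h] at h0s; simp [PySem.List.pyGet?, PySem.List.pyIdx?] at h0s
      · simp [ha, PySem.List.pyGet?, PySem.List.pyIdx?] at h1
    by_cases hr1 : (PySem.List.pyGet? rank 1).getD 0 = 1 ∨ (PySem.List.pyGet? rank 1).getD 0 = 2
    · rw [if_pos hr1] at hpre
      simp only [Bool.and_eq_true] at hpre
      obtain ⟨hps, hppos⟩ := hpre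
      have hpne : ((List.lookup t prizes).getD [] : List Int) ≠ [] := by
        intro hnil
        rw [hnil] at hppos
        simp [PySem.List.pyGet?, PySem.List.pyIdx?] at hppos
      have hnet : pvNetVal prizes t rank
          = some ((PySem.List.pyGet? ((List.lookup t prizes).getD []) 0).getD 0 - 100) := by
        unfold pvNetVal
        rw [if_pos ⟨⟨hlen2, hr0, hr1⟩, hpne⟩]
      rw [hnet, if_pos ⟨hr0, hr1⟩]
    · have hnet : pvNetVal prizes t rank = none := by
        unfold pvNetVal
        rw [if_neg]
        rintro ⟨⟨-, -, hc1⟩, -⟩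
        exact hr1 hc1
      rw [hnet, if_neg (by rintro ⟨-, hc1⟩; exact hr1 hc1)]
  · have hnet : pvNetVal prizes t rank = none := by
      unfold pvNetVal
      rw [if_neg]
      rintro ⟨⟨-, hc0, -⟩, -⟩
      exact hr0 hc0
    rw [hnet, if_neg (by rintro ⟨hc0, -⟩; exact hr0 hc0)]

-- ===== VERDICT (by name: the statement is the Claim_ definition above) =====
theorem umaren_spec : Claim_equal_umaren := by
  intro tickets target_ranks prizes _ hpre
  obtain ⟨hall, hnd⟩ := hpre
  show umaren tickets target_ranks prizes = umaren_alt tickets target_ranks prizes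
  unfold umaren umaren_alt
  apply PySem.List.foldl_congr_mem
  intro acc x hx
  exact step_eq target_ranks prizes hnd x
    (by rw [List.all_eq_true] at hall; exact hall x hx) acc
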